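-- pv_equiv track=rewrite | github.com/MMikilanjelo/dota-ml | backend/app/helper.py | get_hero_role_distribution
-- ===== SOURCE A (Python) =====
-- from typing import Dict, List
--
-- def get_hero_role_distribution(heroes: List[int]) -> Dict[str, int]:
--     """Розподіл ролей у команді"""
--     roles = {
--         'Carry': 0,
--         'Support': 0,
--         'Initiator': 0,
--         'Nuker': 0,
--         'Disabler': 0
--     }
--
--     for hero in heroes:
--         if hero < 30:
--             roles['Carry'] += 1
--         elif hero < 60:
--             roles['Support'] += 1
--         elif hero < 90:
--             roles['Initiator'] += 1
--         else:
--             roles['Nuker'] += 1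
--
--     return roles
-- ===== SOURCE B (Python) =====
-- def get_hero_role_distribution(heroes):
--     """Розподіл ролей у команді"""
--     return {
--         'Carry': sum(1 for h in heroes if h < 30),
--         'Support': sum(1 for h in heroes if 30 <= h < 60),
--         'Initiator': sum(1 for h in heroes if 60 <= h < 90),
--         'Nuker': sum(1 for h in heroes if h >= 90),
--         'Disabler': 0,
--     }
-- ===== Notes on version B (the rewrite author's own statement) =====
-- stated objective: idiomatic
-- what changed: Replaces the single branching accumulation loop over a mutable dict with a dict literal whose counts are computed by independent generator-sum passes with half-open range predicates.
import Mathlib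
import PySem

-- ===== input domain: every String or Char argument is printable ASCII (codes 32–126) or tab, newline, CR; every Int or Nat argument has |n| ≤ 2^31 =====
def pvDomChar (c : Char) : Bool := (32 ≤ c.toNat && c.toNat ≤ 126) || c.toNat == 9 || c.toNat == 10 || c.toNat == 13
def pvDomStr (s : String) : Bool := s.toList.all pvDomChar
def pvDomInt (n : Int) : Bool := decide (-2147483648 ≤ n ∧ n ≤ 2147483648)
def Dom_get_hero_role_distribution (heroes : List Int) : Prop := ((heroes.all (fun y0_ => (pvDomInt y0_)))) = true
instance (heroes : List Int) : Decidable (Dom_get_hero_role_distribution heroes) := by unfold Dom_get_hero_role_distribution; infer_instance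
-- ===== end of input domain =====

-- B computes each role count as its own full countP pass over the list (dict-literal style), instead of A's single branching accumulation loop.
-- ===== PORT A =====
def get_hero_role_distribution (heroes : List Int) : List (String × Int) :=
  let roles : PySem.Dict String Int :=
    PySem.Dict.ofList [("Carry", 0), ("Support", 0), ("Initiator", 0), ("Nuker", 0), ("Disabler", 0)]
  let roles := heroes.foldl (fun roles hero =>
    if hero < 30 then roles.modify "Carry" 0 (· + 1)
    else if hero < 60 then roles.modify "Support" 0 (· + 1)
    else if hero < 90 then roles.modify "Initiator" 0 (· + 1)
    else roles.modify "Nuker" 0 (· + 1)) roles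
  roles.items

-- ===== PORT B =====
def get_hero_role_distribution_alt (heroes : List Int) : List (String × Int) :=
  [("Carry", ((heroes.countP (fun h => decide (h < 30))) : Int)),
   ("Support", ((heroes.countP (fun h => decide (30 ≤ h ∧ h < 60))) : Int)),
   ("Initiator", ((heroes.countP (fun h => decide (60 ≤ h ∧ h < 90))) : Int)),
   ("Nuker", ((heroes.countP (fun h => decide (90 ≤ h))) : Int)),
   ("Disabler", 0)]

-- ===== PRECONDITION & SPEC =====
def Spec_get_hero_role_distribution (heroes : List Int) (out : List (String × Int)) : Prop := out = get_hero_role_distribution_alt heroes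
instance (heroes : List Int) (out : List (String × Int)) : Decidable (Spec_get_hero_role_distribution heroes out) := by unfold Spec_get_hero_role_distribution; infer_instance

-- ===== CLAIM (what is proved, stated in full; the proofs are below) =====
def Claim_equal_get_hero_role_distribution : Prop := ∀ (heroes : List Int), Dom_get_hero_role_distribution heroes → Spec_get_hero_role_distribution heroes (get_hero_role_distribution heroes)

-- ===== LEMMAS AND PROOFS =====
theorem ghrd_aux (l : List Int) (a b c d e : Int) :
    (l.foldl (fun roles hero =>
      if hero < 30 then roles.modify "Carry" 0 (· + 1)
      else if hero < 60 then roles.modify "Support" 0 (· + 1)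
      else if hero < 90 then roles.modify "Initiator" 0 (· + 1)
      else roles.modify "Nuker" 0 (· + 1))
      (PySem.Dict.ofList [("Carry", a), ("Support", b), ("Initiator", c), ("Nuker", d), ("Disabler", e)])).items
    = [("Carry", a + (l.countP (fun h => decide (h < 30)) : Int)),
       ("Support", b + (l.countP (fun h => decide (30 ≤ h ∧ h < 60)) : Int)),
       ("Initiator", c + (l.countP (fun h => decide (60 ≤ h ∧ h < 90)) : Int)),
       ("Nuker", d + (l.countP (fun h => decide (90 ≤ h)) : Int)),
       ("Disabler", e)] := by
  induction l generalizing a b c d e with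
  | nil => simp only [List.foldl_nil, List.countP_nil, Nat.cast_zero, add_zero]; rfl
  | cons x xs ih =>
    rw [List.foldl_cons]
    split_ifs with h1 h2 h3
    · rw [show (PySem.Dict.ofList [("Carry", a), ("Support", b), ("Initiator", c), ("Nuker", d), ("Disabler", e)]).modify "Carry" 0 (· + 1)
            = PySem.Dict.ofList [("Carry", a + 1), ("Support", b), ("Initiator", c), ("Nuker", d), ("Disabler", e)] from rfl, ih]
      simp [h1, show ¬(30 ≤ x) from by omega, show ¬(60 ≤ x) from by omega,
            show ¬(90 ≤ x) from by omega]
      omega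
    · rw [show (PySem.Dict.ofList [("Carry", a), ("Support", b), ("Initiator", c), ("Nuker", d), ("Disabler", e)]).modify "Support" 0 (· + 1)
            = PySem.Dict.ofList [("Carry", a), ("Support", b + 1), ("Initiator", c), ("Nuker", d), ("Disabler", e)] from rfl, ih]
      simp [h1, h2, show (30:Int) ≤ x from by omega, show ¬(60 ≤ x) from by omega,
            show ¬(90 ≤ x) from by omega]
      omega
    · rw [show (PySem.Dict.ofList [("Carry", a), ("Support", b), ("Initiator", c), ("Nuker", d), ("Disabler", e)]).modify "Initiator" 0 (· + 1)
            = PySem.Dict.ofList [("Carry", a), ("Support", b), ("Initiator", c + 1), ("Nuker", d), ("Disabler", e)] from rfl, ih]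
      simp [h1, h2, h3, show (60:Int) ≤ x from by omega, show ¬(90 ≤ x) from by omega]
      omega
    · rw [show (PySem.Dict.ofList [("Carry", a), ("Support", b), ("Initiator", c), ("Nuker", d), ("Disabler", e)]).modify "Nuker" 0 (· + 1)
            = PySem.Dict.ofList [("Carry", a), ("Support", b), ("Initiator", c), ("Nuker", d + 1), ("Disabler", e)] from rfl, ih]
      simp [h1, h2, h3, show (90:Int) ≤ x from by omega]
      omega

-- ===== VERDICT (by name: the statement is the Claim_ definition above) =====
theorem get_hero_role_distribution_spec : Claim_equal_get_hero_role_distribution := by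
  intro heroes _
  unfold Spec_get_hero_role_distribution get_hero_role_distribution get_hero_role_distribution_alt
  simp only [ghrd_aux, Int.zero_add]
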